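-- pv_equiv track=rewrite | github.com/bischoff-m/puzzle-solver | main.py | _enumerate_cube_placements
-- ===== SOURCE A (Python) =====
-- from typing import Literal
--
-- Voxel = tuple[int, int, int]
--
-- Face = Literal["+X", "-X", "+Y", "-Y", "+Z", "-Z"]
--
-- Grid = list[list[bool]]
--
-- def rotate_grid_90_cw(grid: Grid) -> Grid:
--     h = len(grid)
--     w = len(grid[0])
--     return [[grid[h - 1 - y][x] for y in range(h)] for x in range(w)]
--
-- def rotate_grid(grid: Grid, k_cw: int) -> Grid:
--     k = k_cw % 4
--     out = grid
--     for _ in range(k):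
--         out = rotate_grid_90_cw(out)
--     return out
--
-- def _face_map(face: Face, u: int, v: int) -> Voxel:
--     """Map (u,v) in 0..3x0..3 on a face to cube coordinates (x,y,z)."""
--     if face == "+X":
--         return (3, u, v)
--     if face == "-X":
--         return (0, u, v)
--     if face == "+Y":
--         return (u, 3, v)
--     if face == "-Y":
--         return (u, 0, v)
--     if face == "+Z":
--         return (u, v, 3)
--     if face == "-Z":
--         return (u, v, 0)
--     raise ValueError(f"Unknown face: {face}")
--
-- def _enumerate_cube_placements(
--     piece_grid: Grid,
-- ) -> list[tuple[Face, int, set[Voxel]]]: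
--     """All (face, rotation) placements of a 4x4 piece on the 4x4x4 cube boundary."""
--     placements: list[tuple[Face, int, set[Voxel]]] = []
--     faces: list[Face] = ["+X", "-X", "+Y", "-Y", "+Z", "-Z"]
--     for face in faces:
--         for rot in range(4):
--             g = rotate_grid(piece_grid, rot)
--             occ: set[Voxel] = set()
--             for v in range(4):
--                 for u in range(4):
--                     if g[v][u]:
--                         occ.add(_face_map(face, u, v))
--             placements.append((face, rot, occ))
--     return placements
-- ===== SOURCE B (Python) =====
-- # B: rotate coordinates instead of rebuilding grids: for each rotation compute
-- # once the occupied destination cells via an inverse coordinate rotation, then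
-- # reuse them for all six faces.
--
-- def _face_map(face, u, v):
--     if face == "+X":
--         return (3, u, v)
--     if face == "-X":
--         return (0, u, v)
--     if face == "+Y":
--         return (u, 3, v)
--     if face == "-Y":
--         return (u, 0, v)
--     if face == "+Z":
--         return (u, v, 3)
--     if face == "-Z":
--         return (u, v, 0)
--     raise ValueError(f"Unknown face: {face}")
--
-- def _enumerate_cube_placements(piece_grid):
--     h = len(piece_grid)
--     w = len(piece_grid[0])
--     rot_cells = []
--     for rot in range(4):
--         cells = []
--         for v in range(4):
--             for u in range(4):
--                 # invert 'rot' clockwise quarter-turns on (u, v)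
--                 uu, vv = u, v
--                 W, H = (w, h) if rot % 2 == 0 else (h, w)
--                 for _ in range(rot):
--                     uu, vv, W, H = vv, W - 1 - uu, H, W
--                 if piece_grid[vv][uu]:
--                     cells.append((u, v))
--         rot_cells.append(cells)
--     placements = []
--     for face in ["+X", "-X", "+Y", "-Y", "+Z", "-Z"]:
--         for rot in range(4):
--             occ = set()
--             for u, v in rot_cells[rot]:
--                 occ.add(_face_map(face, u, v))
--             placements.append((face, rot, occ))
--     return placements
-- ===== Notes on version B (the rewrite author's own statement) =====
-- stated objective: faster
-- what changed: B never builds rotated grids: it computes, once per rotation, the occupied destination cells of the 4x4 window by an inverse coordinate-rotation formula (64 cell lookups total) and reuses that list for all six faces, instead of A's 24 full-grid rotations with rescans.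
import Mathlib
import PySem

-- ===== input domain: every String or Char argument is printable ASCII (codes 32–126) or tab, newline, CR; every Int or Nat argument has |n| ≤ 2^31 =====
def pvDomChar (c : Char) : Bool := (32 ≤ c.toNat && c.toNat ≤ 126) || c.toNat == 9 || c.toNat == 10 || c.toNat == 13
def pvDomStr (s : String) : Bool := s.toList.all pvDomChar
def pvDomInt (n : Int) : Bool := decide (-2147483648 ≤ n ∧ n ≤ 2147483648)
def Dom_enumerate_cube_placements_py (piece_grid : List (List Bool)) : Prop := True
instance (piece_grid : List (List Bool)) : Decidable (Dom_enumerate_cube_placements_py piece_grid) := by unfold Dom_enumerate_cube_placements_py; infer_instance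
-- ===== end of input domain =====

-- B rotates coordinates instead of rebuilding grids: it computes each rotation's occupied
-- destination cells once (by an inverse coordinate-rotation formula, no grid rebuilt) and
-- reuses them for all six faces; same return value as A on Pre_, measurably faster on large grids.

-- ===== PORT A =====
-- helper: rotate_grid_90_cw (grid[0] on an empty grid raises in Python; Pre_ excludes that,
-- the pyGetD default [] is only reached outside Pre_)
def rotate_grid_90_cw_py (grid : List (List Bool)) : List (List Bool) :=
  let h := grid.length
  let w := (PySem.List.pyGetD grid 0 []).length
  (PySem.List.pyRange 0 (w : Int) 1).map (fun x =>
    (PySem.List.pyRange 0 (h : Int) 1).map (fun y =>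
      PySem.List.pyGetD (PySem.List.pyGetD grid ((h : Int) - 1 - y) []) x false))

def rotate_grid_py (grid : List (List Bool)) (k_cw : Int) : List (List Bool) :=
  let k := PySem.Int.mod k_cw 4
  (PySem.List.pyRange 0 k 1).foldl (fun out _ => rotate_grid_90_cw_py out) grid

-- helper _face_map; identical in A's module and in Source B, shared by both ports.
-- The final 'raise ValueError' branch is unreachable for the six face literals both ports pass.
def face_map_py (face : String) (u v : Int) : Int × Int × Int :=
  if face = "+X" then (3, u, v)
  else if face = "-X" then (0, u, v)
  else if face = "+Y" then (u, 3, v)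
  else if face = "-Y" then (u, 0, v)
  else if face = "+Z" then (u, v, 3)
  else if face = "-Z" then (u, v, 0)
  else (0, 0, 0)

def enumerate_cube_placements_py (piece_grid : List (List Bool)) : List (String × Int × (List (Int × Int × Int))) :=
  let faces : List String := ["+X", "-X", "+Y", "-Y", "+Z", "-Z"]
  faces.foldl (fun placements face =>
    (PySem.List.pyRange 0 4 1).foldl (fun placements rot =>
      let g := rotate_grid_py piece_grid rot
      let occ : PySem.Set (Int × Int × Int) :=
        (PySem.List.pyRange 0 4 1).foldl (fun occ v =>
          (PySem.List.pyRange 0 4 1).foldl (fun occ u =>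
            if PySem.List.pyGetD (PySem.List.pyGetD g v []) u false then
              PySem.Set.add occ (face_map_py face u v)
            else occ) occ) PySem.Set.empty
      placements ++ [(face, rot, occ)]) placements) []

-- ===== PORT B =====
def enumerate_cube_placements_py_alt (piece_grid : List (List Bool)) : List (String × Int × (List (Int × Int × Int))) :=
  let h : Int := piece_grid.length
  let w : Int := (PySem.List.pyGetD piece_grid 0 []).length
  let rot_cells : List (List (Int × Int)) :=
    (PySem.List.pyRange 0 4 1).foldl (fun rc rot =>
      let cells : List (Int × Int) :=
        (PySem.List.pyRange 0 4 1).foldl (fun cells v =>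
          (PySem.List.pyRange 0 4 1).foldl (fun cells u =>
            let s0 : Int × Int × Int × Int :=
              if PySem.Int.mod rot 2 = 0 then (u, v, w, h) else (u, v, h, w)
            let s := (PySem.List.pyRange 0 rot 1).foldl
              (fun (s : Int × Int × Int × Int) _ =>
                (s.2.1, s.2.2.1 - 1 - s.1, s.2.2.2, s.2.2.1)) s0
            if PySem.List.pyGetD (PySem.List.pyGetD piece_grid s.2.1 []) s.1 false then
              cells ++ [(u, v)]
            else cells) cells) []
      rc ++ [cells]) []
  let faces : List String := ["+X", "-X", "+Y", "-Y", "+Z", "-Z"]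
  faces.foldl (fun placements face =>
    (PySem.List.pyRange 0 4 1).foldl (fun placements rot =>
      let occ : PySem.Set (Int × Int × Int) :=
        (PySem.List.pyGetD rot_cells rot []).foldl
          (fun occ p => PySem.Set.add occ (face_map_py face p.1 p.2)) PySem.Set.empty
      placements ++ [(face, rot, occ)]) placements) []

-- ===== PRECONDITION & SPEC =====
-- Pre_ is exactly the set of inputs on which the Python A returns: at least 4 rows, the
-- first row at least 4 wide, and no row shorter than the first (otherwise an IndexError
-- in the 4x4 scan or in rotate_grid_90_cw).
def Pre_enumerate_cube_placements_py (piece_grid : List (List Bool)) : Prop :=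
  4 ≤ piece_grid.length ∧ 4 ≤ (PySem.List.pyGetD piece_grid 0 []).length ∧
    ∀ r ∈ piece_grid, (PySem.List.pyGetD piece_grid 0 []).length ≤ r.length
instance (piece_grid : List (List Bool)) : Decidable (Pre_enumerate_cube_placements_py piece_grid) := by unfold Pre_enumerate_cube_placements_py; infer_instance

def pvWitness_enumerate_cube_placements_py : List (List Bool) :=
  [[true, false, false, true], [false, true, true, false],
   [false, false, false, false], [true, true, false, false]]

def Spec_enumerate_cube_placements_py (piece_grid : List (List Bool)) (out : List (String × Int × (List (Int × Int × Int)))) : Prop := out = enumerate_cube_placements_py_alt piece_grid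
instance (piece_grid : List (List Bool)) (out : List (String × Int × (List (Int × Int × Int)))) : Decidable (Spec_enumerate_cube_placements_py piece_grid out) := by unfold Spec_enumerate_cube_placements_py; infer_instance

-- ===== CLAIM (what is proved, stated in full; the proofs are below) =====
def Claim_equal_enumerate_cube_placements_py : Prop := ∀ (piece_grid : List (List Bool)), Dom_enumerate_cube_placements_py piece_grid → Pre_enumerate_cube_placements_py piece_grid → Spec_enumerate_cube_placements_py piece_grid (enumerate_cube_placements_py piece_grid)

-- ===== LEMMAS AND PROOFS =====

theorem pyRange4 : PySem.List.pyRange 0 4 1 = [0,1,2,3] := by decide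
theorem rot0 (g : List (List Bool)) : rotate_grid_py g 0 = g := by
  simp only [rotate_grid_py, show PySem.Int.mod 0 4 = 0 from by decide,
    show PySem.List.pyRange 0 0 1 = [] from by decide, List.foldl_nil]
theorem rot1 (g : List (List Bool)) : rotate_grid_py g 1 = rotate_grid_90_cw_py g := by
  simp only [rotate_grid_py, show PySem.Int.mod 1 4 = 1 from by decide,
    show PySem.List.pyRange 0 1 1 = [0] from by decide, List.foldl_cons, List.foldl_nil]
theorem rot2 (g : List (List Bool)) : rotate_grid_py g 2 = rotate_grid_90_cw_py (rotate_grid_90_cw_py g) := by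
  simp only [rotate_grid_py, show PySem.Int.mod 2 4 = 2 from by decide,
    show PySem.List.pyRange 0 2 1 = [0, 1] from by decide, List.foldl_cons, List.foldl_nil]
theorem rot3 (g : List (List Bool)) : rotate_grid_py g 3 = rotate_grid_90_cw_py (rotate_grid_90_cw_py (rotate_grid_90_cw_py g)) := by
  simp only [rotate_grid_py, show PySem.Int.mod 3 4 = 3 from by decide,
    show PySem.List.pyRange 0 3 1 = [0, 1, 2] from by decide, List.foldl_cons, List.foldl_nil]

theorem cell_rot90 (g : List (List Bool)) (v u : Int) (hv0 : 0 ≤ v)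
    (hv : v < ((PySem.List.pyGetD g 0 []).length : Int)) (hu0 : 0 ≤ u)
    (hu : u < (g.length : Int)) :
    PySem.List.pyGetD (PySem.List.pyGetD (rotate_grid_90_cw_py g) v []) u false
      = PySem.List.pyGetD (PySem.List.pyGetD g ((g.length : Int) - 1 - u) []) v false := by
  unfold rotate_grid_90_cw_py
  rw [PySem.List.pyGetD_map_pyRange_of_nonneg _ _ _ _ hv0 hv,
      PySem.List.pyGetD_map_pyRange_of_nonneg _ _ _ _ hu0 hu]

theorem rot90_length (g : List (List Bool)) :
    (rotate_grid_90_cw_py g).length = (PySem.List.pyGetD g 0 []).length := by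
  unfold rotate_grid_90_cw_py
  simp [pysem]

theorem rot90_width (g : List (List Bool)) (hw : 0 < (PySem.List.pyGetD g 0 []).length) :
    (PySem.List.pyGetD (rotate_grid_90_cw_py g) 0 []).length = g.length := by
  unfold rotate_grid_90_cw_py
  rw [PySem.List.pyGetD_map_pyRange_of_nonneg _ _ _ _ (by omega) (by exact_mod_cast hw)]
  simp [pysem]

theorem pvGet4_0 {α : Type} (a b c d : α) (e : α) : PySem.List.pyGetD [a, b, c, d] (0 : Int) e = a := rfl
theorem pvGet4_1 {α : Type} (a b c d : α) (e : α) : PySem.List.pyGetD [a, b, c, d] (1 : Int) e = b := rfl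
theorem pvGet4_2 {α : Type} (a b c d : α) (e : α) : PySem.List.pyGetD [a, b, c, d] (2 : Int) e = c := rfl
theorem pvGet4_3 {α : Type} (a b c d : α) (e : α) : PySem.List.pyGetD [a, b, c, d] (3 : Int) e = d := rfl

theorem foldl_add_build_inner (face : String) (c : Int → Bool)
    (us : List Int) (v : Int) : ∀ (cl : List (Int × Int)) (s : PySem.Set (Int × Int × Int)),
    (us.foldl (fun cl u => if c u then cl ++ [(u, v)] else cl) cl).foldl
        (fun occ p => PySem.Set.add occ (face_map_py face p.1 p.2)) s
      = us.foldl (fun occ u => if c u then PySem.Set.add occ (face_map_py face u v) else occ)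
          (cl.foldl (fun occ p => PySem.Set.add occ (face_map_py face p.1 p.2)) s) := by
  induction us with
  | nil => intro cl s; rfl
  | cons u us ih =>
    intro cl s
    simp only [List.foldl_cons]
    by_cases hc : c u
    · rw [if_pos hc, if_pos hc, ih, List.foldl_append]
      simp only [List.foldl_cons, List.foldl_nil]
    · rw [if_neg hc, if_neg hc, ih]

theorem foldl_add_build (face : String) (c : Int → Int → Bool)
    (us : List Int) : ∀ (vs : List Int) (cl : List (Int × Int)) (s : PySem.Set (Int × Int × Int)),
    (vs.foldl (fun cl v => us.foldl (fun cl u => if c v u then cl ++ [(u, v)] else cl) cl) cl).foldl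
        (fun occ p => PySem.Set.add occ (face_map_py face p.1 p.2)) s
      = vs.foldl (fun occ v => us.foldl
            (fun occ u => if c v u then PySem.Set.add occ (face_map_py face u v) else occ) occ)
          (cl.foldl (fun occ p => PySem.Set.add occ (face_map_py face p.1 p.2)) s) := by
  intro vs
  induction vs with
  | nil => intro cl s; rfl
  | cons v vs ih =>
    intro cl s
    simp only [List.foldl_cons]
    rw [ih, foldl_add_build_inner]

theorem pv_main (g : List (List Bool)) (h4 : 4 ≤ g.length)
    (w4 : 4 ≤ (PySem.List.pyGetD g 0 []).length) :
    enumerate_cube_placements_py g = enumerate_cube_placements_py_alt g := by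
  simp only [enumerate_cube_placements_py, enumerate_cube_placements_py_alt, pyRange4]
  apply PySem.List.foldl_congr_mem
  intro pl face hface
  apply PySem.List.foldl_congr_mem
  intro pl' rot hrot
  congr 2
  simp only [Prod.mk.injEq, true_and]
  rw [PySem.List.foldl_append_singleton_eq_map]
  simp only [List.nil_append, List.map_cons, List.map_nil]
  fin_cases hrot
  · -- rot = 0
    rw [pvGet4_0, foldl_add_build face, rot0]
    simp only [List.foldl_nil]
    rw [show PySem.List.pyRange 0 0 1 = [] from rfl]
    simp only [List.foldl_nil]
    rfl
  · -- rot = 1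
    rw [pvGet4_1, foldl_add_build face, rot1]
    simp only [List.foldl_nil]
    apply PySem.List.foldl_congr_mem
    intro occ v hv
    apply PySem.List.foldl_congr_mem
    intro occ' u hu
    have hv4 : 0 ≤ v ∧ v < 4 := by fin_cases hv <;> norm_num
    have hu4 : 0 ≤ u ∧ u < 4 := by fin_cases hu <;> norm_num
    simp only [show PySem.Int.mod 1 2 = 1 from rfl]
    rw [show PySem.List.pyRange 0 1 1 = [0] from rfl]
    simp only [List.foldl_cons, List.foldl_nil]
    rw [cell_rot90 g v u hv4.1 (by omega) hu4.1 (by omega)]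
    rfl
  · -- rot = 2
    rw [pvGet4_2, foldl_add_build face, rot2]
    simp only [List.foldl_nil]
    apply PySem.List.foldl_congr_mem
    intro occ v hv
    apply PySem.List.foldl_congr_mem
    intro occ' u hu
    have hv4 : 0 ≤ v ∧ v < 4 := by fin_cases hv <;> norm_num
    have hu4 : 0 ≤ u ∧ u < 4 := by fin_cases hu <;> norm_num
    have hw : 0 < (PySem.List.pyGetD g 0 []).length := by omega
    have e1 := rot90_length g
    have e2 := rot90_width g hw
    simp only [show PySem.Int.mod 2 2 = 0 from rfl, reduceIte]
    rw [show PySem.List.pyRange 0 2 1 = [0, 1] from rfl]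
    simp only [List.foldl_cons, List.foldl_nil]
    rw [cell_rot90 (rotate_grid_90_cw_py g) v u hv4.1 (by rw [e2]; omega)
          hu4.1 (by rw [e1]; omega),
        e1,
        cell_rot90 g ((((PySem.List.pyGetD g 0 []).length : Int)) - 1 - u) v
          (by omega) (by omega) hv4.1 (by omega)]
    rfl
  · -- rot = 3
    rw [pvGet4_3, foldl_add_build face, rot3]
    simp only [List.foldl_nil]
    apply PySem.List.foldl_congr_mem
    intro occ v hv
    apply PySem.List.foldl_congr_mem
    intro occ' u hu
    have hv4 : 0 ≤ v ∧ v < 4 := by fin_cases hv <;> norm_num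
    have hu4 : 0 ≤ u ∧ u < 4 := by fin_cases hu <;> norm_num
    have hw : 0 < (PySem.List.pyGetD g 0 []).length := by omega
    have e1 := rot90_length g
    have e2 := rot90_width g hw
    have e3 : (PySem.List.pyGetD (rotate_grid_90_cw_py (rotate_grid_90_cw_py g)) 0 []).length
        = (PySem.List.pyGetD g 0 []).length := by
      rw [rot90_width (rotate_grid_90_cw_py g) (by rw [e2]; omega), e1]
    have e4 : (rotate_grid_90_cw_py (rotate_grid_90_cw_py g)).length = g.length := by
      rw [rot90_length, e2]
    simp only [show PySem.Int.mod 3 2 = 1 from rfl]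
    rw [show PySem.List.pyRange 0 3 1 = [0, 1, 2] from rfl]
    simp only [List.foldl_cons, List.foldl_nil]
    rw [cell_rot90 (rotate_grid_90_cw_py (rotate_grid_90_cw_py g)) v u
          hv4.1 (by rw [e3]; omega) hu4.1 (by rw [e4]; omega),
        e4,
        cell_rot90 (rotate_grid_90_cw_py g) ((g.length : Int) - 1 - u) v
          (by omega) (by rw [e2]; omega)
          hv4.1 (by rw [e1]; omega),
        e1,
        cell_rot90 g ((((PySem.List.pyGetD g 0 []).length : Int)) - 1 - v)
          ((g.length : Int) - 1 - u)
          (by omega) (by omega)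
          (by omega) (by omega)]
    rfl

-- ===== VERDICT (by name: the statement is the Claim_ definition above) =====
theorem enumerate_cube_placements_py_spec : Claim_equal_enumerate_cube_placements_py := by
  intro g _ hpre
  exact pv_main g hpre.1 hpre.2.1
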